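-- pv_equiv track=rewrite | github.com/elcuervo/gliner | onnx/decoder.py | parse_field_spec
-- ===== SOURCE A (Python) =====
-- from typing import Dict, List, Mapping, Optional, Sequence, Tuple
--
-- def parse_field_spec(spec: str) -> Tuple[str, str, Optional[str]]:
--     parts = spec.split("::")
--     name = parts[0]
--     dtype = "list"
--     description = None
--     dtype_explicit = False
--     for part in parts[1:]:
--         if part in ("str", "list"):
--             dtype = part
--             dtype_explicit = True
--         elif part.startswith("[") and part.endswith("]"):
--             if not dtype_explicit:
--                 dtype = "str"
--         elif description is None:
--             description = part
--         else:
--             description += f"::{part}"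
--     return name, dtype, description
-- ===== SOURCE B (Python) =====
-- def _go(s):
--     # returns (explicit_dtype_or_None, bracket_seen, description) for the
--     # "::"-separated tokens of s, assembled right-to-left: the tail is solved
--     # first, then the current token is merged in front of it.
--     part, sep, rest = s.partition("::")
--     if sep:
--         exp, br, desc = _go(rest)
--     else:
--         exp, br, desc = None, False, None
--     if part in ("str", "list"):
--         if exp is None:
--             exp = part
--     elif part.startswith("[") and part.endswith("]"):
--         br = True
--     elif desc is None:
--         desc = part
--     else:
--         desc = part + "::" + desc
--     return exp, br, desc
--
--
-- def parse_field_spec(spec):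
--     name, sep, tail = spec.partition("::")
--     if not sep:
--         return name, "list", None
--     exp, br, desc = _go(tail)
--     return name, exp if exp is not None else ("str" if br else "list"), desc
-- ===== Notes on version B (the rewrite author's own statement) =====
-- stated objective: alternative
-- what changed: Replaces split-then-stateful-left-loop by a recursive descent on the raw string via str.partition('::'): no token list and no dtype_explicit flag; each token is merged in front of the recursively solved tail, so the result is assembled right-to-left.
import Mathlib
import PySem

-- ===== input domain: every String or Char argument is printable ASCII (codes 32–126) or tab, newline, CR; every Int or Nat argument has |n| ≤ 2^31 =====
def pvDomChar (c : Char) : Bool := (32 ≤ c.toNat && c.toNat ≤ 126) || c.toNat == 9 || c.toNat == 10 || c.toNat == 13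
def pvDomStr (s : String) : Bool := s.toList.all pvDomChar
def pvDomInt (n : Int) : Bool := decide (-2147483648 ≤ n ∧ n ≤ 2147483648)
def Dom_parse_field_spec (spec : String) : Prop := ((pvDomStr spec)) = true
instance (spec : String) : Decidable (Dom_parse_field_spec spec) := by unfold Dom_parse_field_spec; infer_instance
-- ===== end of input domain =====

-- B replaces A's split-then-stateful-loop by a recursive descent on the raw string via
-- partition("::"), assembling the result right-to-left (alternative decomposition, same cost).

-- ===== PORT A =====
-- A's loop body, one step per part, over the state (dtype, description, dtype_explicit)
def pvStepA (st : String × Option String × Bool) (part : String) : String × Option String × Bool :=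
  if part == "str" || part == "list" then (part, st.2.1, true)
  else if PySem.Str.startswith part "[" && PySem.Str.endswith part "]" then
    (if !st.2.2 then ("str", st.2.1, st.2.2) else st)
  else match st.2.1 with
    | none => (st.1, some part, st.2.2)
    | some d => (st.1, some (d ++ "::" ++ part), st.2.2)

def parse_field_spec (spec : String) : String × String × Option String :=
  let parts := (PySem.Str.split? spec "::").getD []   -- sep "::" ≠ "", so split? is always `some`
  let name := parts.headI                              -- parts[0]; split never returns []
  let st := parts.tail.foldl pvStepA ("list", none, false)
  (name, st.1, st.2.1)

-- ===== PORT B =====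
-- hand port of s.partition("::") (PySem has no partition): the text before the FIRST
-- occurrence of "::" and the text after it, or none if "::" does not occur — exact.
def pvPartition : List Char → Option (List Char × List Char)
  | ':' :: ':' :: rest => some ([], rest)
  | c :: rest => (pvPartition rest).map (fun p => (c :: p.1, p.2))
  | [] => none

theorem pvPartition_cons (c : Char) (rest : List Char) (h : ¬ (c = ':' ∧ ∃ r, rest = ':' :: r)) :
    pvPartition (c :: rest) = (pvPartition rest).map (fun p => (c :: p.1, p.2)) := by
  cases rest with
  | nil => simp [pvPartition]
  | cons d r => by_cases hc : c = ':' <;> by_cases hd : d = ':' <;> simp_all [pvPartition]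

theorem pvPartition_length (cs : List Char) : ∀ (a b : List Char), pvPartition cs = some (a, b) → b.length < cs.length := by
  induction cs using pvPartition.induct with
  | case1 rest => intro a b h; simp [pvPartition] at h; simp [h.2]
  | case2 c rest h1 ih =>
    intro a b h
    rw [pvPartition_cons c rest (by rintro ⟨hc, r, hr⟩; exact h1 r hc hr)] at h
    cases hp : pvPartition rest with
    | none => simp [hp] at h
    | some p => simp [hp] at h; have := ih p.1 p.2 (by rw [hp]); simp [← h.2]; omega
  | case3 => intro a b h; simp [pvPartition] at h

-- B's recursive merge of one token into the solved tail
def pvCombine (part : List Char) (st : Option (List Char) × Bool × Option (List Char)) :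
    Option (List Char) × Bool × Option (List Char) :=
  if part == "str".toList || part == "list".toList then
    ((match st.1 with | none => some part | some e => some e), st.2.1, st.2.2)
  else if PySem.Chars.startswith part ['['] && PySem.Chars.endswith part [']'] then
    (st.1, true, st.2.2)
  else match st.2.2 with
    | none => (st.1, st.2.1, some part)
    | some d => (st.1, st.2.1, some (part ++ ':' :: ':' :: d))

def pvGo (s : List Char) : Option (List Char) × Bool × Option (List Char) :=
  match h : pvPartition s with
  | some (part, rest) => pvCombine part (pvGo rest)
  | none => pvCombine s (none, false, none)
termination_by s.length
decreasing_by exact pvPartition_length s _ _ h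

def parse_field_spec_alt (spec : String) : String × String × Option String :=
  match pvPartition spec.toList with
  | none => (spec, "list", none)
  | some (name, tail) =>
    let st := pvGo tail
    let dtype := match st.1 with
      | some d => String.ofList d
      | none => if st.2.1 then "str" else "list"
    (String.ofList name, dtype, st.2.2.map String.ofList)

-- ===== PRECONDITION & SPEC =====
def Spec_parse_field_spec (spec : String) (out : String × String × Option String) : Prop := out = parse_field_spec_alt spec
instance (spec : String) (out : String × String × Option String) : Decidable (Spec_parse_field_spec spec out) := by unfold Spec_parse_field_spec; infer_instance

-- ===== CLAIM (what is proved, stated in full; the proofs are below) =====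
def Claim_equal_parse_field_spec : Prop := ∀ (spec : String), Dom_parse_field_spec spec → Spec_parse_field_spec spec (parse_field_spec spec)

-- ===== LEMMAS AND PROOFS =====

-- the tokens of cs split at every "::", phrased through pvPartition
def pvSplitList (cs : List Char) : List (List Char) :=
  match h : pvPartition cs with
  | none => [cs]
  | some (a, b) => a :: pvSplitList b
termination_by cs.length
decreasing_by exact pvPartition_length cs _ _ h

theorem pvSplitList_eq (cs : List Char) : pvSplitList cs =
    match pvPartition cs with | none => [cs] | some (a, b) => a :: pvSplitList b := by
  rw [pvSplitList]
  split
  · next h => rw [h]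
  · next a b h => rw [h]

theorem pvSplitList_nil : pvSplitList [] = [[]] := by rw [pvSplitList_eq]; rfl

theorem pvSplitList_sep (rest : List Char) : pvSplitList (':' :: ':' :: rest) = [] :: pvSplitList rest := by
  rw [pvSplitList_eq]; rfl

theorem pvSplitList_cons (c : Char) (rest : List Char) (h : ¬ (c = ':' ∧ ∃ r, rest = ':' :: r)) :
    pvSplitList (c :: rest) = (c :: (pvSplitList rest).headI) :: (pvSplitList rest).tail := by
  rw [pvSplitList_eq, pvPartition_cons c rest h]
  conv_rhs => rw [pvSplitList_eq]
  cases hp : pvPartition rest with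
  | none => simp
  | some p => simp

theorem pvSplitList_ne_nil (cs : List Char) : pvSplitList cs ≠ [] := by
  rw [pvSplitList_eq]
  cases pvPartition cs with
  | none => simp
  | some p => simp

-- PySem's fuel-based splitter computes pvSplitList
theorem pvGoSplit_eq (fuel : Nat) : ∀ (cs cur : List Char) (acc : List (List Char)), cs.length < fuel →
    PySem.Chars.splitOn.go [':', ':'] fuel cs cur acc =
      acc.reverse ++ (cur.reverse ++ (pvSplitList cs).headI) :: (pvSplitList cs).tail := by
  induction fuel with
  | zero => intro cs cur acc h; omega
  | succ fuel ih =>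
    intro cs cur acc h
    match cs with
    | [] => simp [PySem.Chars.splitOn.go, pvSplitList_nil]
    | ':' :: ':' :: rest =>
      rw [show PySem.Chars.splitOn.go [':',':'] (fuel+1) (':'::':'::rest) cur acc
          = PySem.Chars.splitOn.go [':',':'] fuel rest [] (cur.reverse :: acc) from by
        simp [PySem.Chars.splitOn.go, List.isPrefixOf]]
      rw [ih rest [] (cur.reverse :: acc) (by simp at h ⊢; omega), pvSplitList_sep]
      rcases hsp : pvSplitList rest with _ | ⟨t, ts⟩
      · exact absurd hsp (pvSplitList_ne_nil rest)
      · simp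
    | c :: rest =>
      by_cases hno : (c = ':' ∧ ∃ r, rest = ':' :: r)
      case pos =>
        obtain ⟨hc, r, hr⟩ := hno
        subst hc hr
        rw [show PySem.Chars.splitOn.go [':',':'] (fuel+1) (':'::':'::r) cur acc
            = PySem.Chars.splitOn.go [':',':'] fuel r [] (cur.reverse :: acc) from by
          simp [PySem.Chars.splitOn.go, List.isPrefixOf]]
        rw [ih r [] (cur.reverse :: acc) (by simp at h ⊢; omega), pvSplitList_sep]
        rcases hsp : pvSplitList r with _ | ⟨t, ts⟩
        · exact absurd hsp (pvSplitList_ne_nil r)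
        · simp
      case neg =>
        have hpref : ([':',':'] : List Char).isPrefixOf (c :: rest) = false := by
          rcases rest with _ | ⟨d, r⟩
          · simp [List.isPrefixOf]
          · by_cases hc : c = ':' <;> by_cases hd : d = ':' <;>
              simp_all [List.isPrefixOf] <;> (intro hh; subst hh; simp_all)
        rw [show PySem.Chars.splitOn.go [':',':'] (fuel+1) (c::rest) cur acc
            = PySem.Chars.splitOn.go [':',':'] fuel rest (c :: cur) acc from by
          simp [PySem.Chars.splitOn.go, hpref]]
        rw [ih rest (c :: cur) acc (by simp at h ⊢; omega), pvSplitList_cons c rest hno]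
        simp

theorem splitOn_eq_pvSplitList (cs : List Char) :
    PySem.Chars.splitOn cs [':', ':'] = pvSplitList cs := by
  have := pvGoSplit_eq (cs.length + 1) cs [] [] (by omega)
  rw [show PySem.Chars.splitOn cs [':',':'] = PySem.Chars.splitOn.go [':',':'] (cs.length+1) cs [] [] from rfl, this]
  rcases hsp : pvSplitList cs with _ | ⟨t, ts⟩
  · exact absurd hsp (pvSplitList_ne_nil cs)
  · simp

-- B's token-level predicates
def pvExplC (p : List Char) : Bool := p == "str".toList || p == "list".toList
def pvBrC (p : List Char) : Bool := PySem.Chars.startswith p ['['] && PySem.Chars.endswith p [']']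
def pvDescC (os : List (List Char)) : Option (List Char) :=
  if os.isEmpty then none else some (PySem.Chars.join [':', ':'] os)

theorem pvGo_eq' (cs : List Char) : pvGo cs =
    match pvPartition cs with | none => pvCombine cs (none, false, none) | some (a, b) => pvCombine a (pvGo b) := by
  rw [pvGo]
  split
  · next h => rw [h]
  · next h => rw [h]

-- pvGo unrolls to a right fold over the token list
theorem pvGo_eq_foldr (cs : List Char) :
    pvGo cs = (pvSplitList cs).foldr pvCombine (none, false, none) := by
  have H : ∀ n (cs : List Char), cs.length ≤ n → pvGo cs = (pvSplitList cs).foldr pvCombine (none, false, none) := by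
    intro n
    induction n with
    | zero =>
      intro cs h
      rw [pvGo_eq', pvSplitList_eq]
      cases hp : pvPartition cs with
      | none => simp
      | some p =>
        have := pvPartition_length cs p.1 p.2 (by rw [hp])
        omega
    | succ n ih =>
      intro cs h
      rw [pvGo_eq', pvSplitList_eq]
      cases hp : pvPartition cs with
      | none => simp
      | some p =>
        have := pvPartition_length cs p.1 p.2 (by rw [hp])
        simp [ih p.2 (by omega)]
  exact H cs.length cs le_rfl

-- the right fold computed by three aggregates
theorem foldr_pvCombine_eq (l : List (List Char)) :
    l.foldr pvCombine (none, false, none) =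
      ((l.filter pvExplC).getLast?, l.any pvBrC, pvDescC (l.filter (fun p => !pvExplC p && !pvBrC p))) := by
  induction l with
  | nil => simp [pvDescC]
  | cons p l ih =>
    rw [List.foldr_cons, ih]
    by_cases hp : pvExplC p = true
    · rw [show pvCombine p ((l.filter pvExplC).getLast?, l.any pvBrC, pvDescC (l.filter (fun p => !pvExplC p && !pvBrC p)))
          = ((match (l.filter pvExplC).getLast? with | none => some p | some e => some e), l.any pvBrC, pvDescC (l.filter (fun p => !pvExplC p && !pvBrC p))) from by
        unfold pvCombine; rw [show (p == "str".toList || p == "list".toList) = pvExplC p from rfl, hp]; rfl]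
      have hexp : ((p :: l).filter pvExplC).getLast? =
          match (l.filter pvExplC).getLast? with | none => some p | some e => some e := by
        rw [List.filter_cons_of_pos hp]
        cases hg : (l.filter pvExplC).getLast? with
        | none => simp [List.getLast?_cons, List.getLast?_eq_none_iff.mp hg]
        | some x => simp [List.getLast?_cons, hg]
      rw [List.filter_cons, List.any_cons, List.filter_cons]
      simp only [hp]
      simp only [List.filter_cons] at hexp
      simp only [hp] at hexp
      rw [← hexp]
      have hbr : pvBrC p = false := by
        revert hp; unfold pvExplC pvBrC PySem.Chars.startswith PySem.Chars.endswith
        rcases hpe : p == "str".toList with _|_ <;> rcases hpl : p == "list".toList with _|_ <;> simp_all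
      simp [hbr]
    · rw [Bool.not_eq_true] at hp
      by_cases hb : pvBrC p = true
      · rw [show pvCombine p ((l.filter pvExplC).getLast?, l.any pvBrC, pvDescC (l.filter (fun p => !pvExplC p && !pvBrC p)))
            = ((l.filter pvExplC).getLast?, true, pvDescC (l.filter (fun p => !pvExplC p && !pvBrC p))) from by
          unfold pvCombine
          rw [show (p == "str".toList || p == "list".toList) = pvExplC p from rfl, hp,
              show (PySem.Chars.startswith p ['['] && PySem.Chars.endswith p [']']) = pvBrC p from rfl, hb]
          rfl]
        simp [List.any_cons, hp, hb]
      · rw [Bool.not_eq_true] at hb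
        rw [show pvCombine p ((l.filter pvExplC).getLast?, l.any pvBrC, pvDescC (l.filter (fun p => !pvExplC p && !pvBrC p)))
            = ((l.filter pvExplC).getLast?, l.any pvBrC,
               (match pvDescC (l.filter (fun p => !pvExplC p && !pvBrC p)) with
                | none => some p | some d => some (p ++ ':' :: ':' :: d))) from by
          unfold pvCombine
          rw [show (p == "str".toList || p == "list".toList) = pvExplC p from rfl, hp,
              show (PySem.Chars.startswith p ['['] && PySem.Chars.endswith p [']']) = pvBrC p from rfl, hb]
          cases pvDescC (l.filter (fun p => !pvExplC p && !pvBrC p)) <;> rfl]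
        have hdesc : (match pvDescC (l.filter (fun p => !pvExplC p && !pvBrC p)) with
            | none => some p | some d => some (p ++ ':' :: ':' :: d))
            = pvDescC (p :: l.filter (fun p => !pvExplC p && !pvBrC p)) := by
          rcases hos : l.filter (fun p => !pvExplC p && !pvBrC p) with _ | ⟨o, os⟩
          · simp [pvDescC, PySem.Chars.join_singleton]
          · simp [pvDescC, PySem.Chars.join_cons_cons]
        rw [hdesc, List.filter_cons, List.any_cons, List.filter_cons]
        simp [hp, hb]

-- ===== A-side: the left fold characterised by the same aggregates =====
def pvIsExpl (p : String) : Bool := p == "str" || p == "list"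
def pvIsBr (p : String) : Bool := PySem.Str.startswith p "[" && PySem.Str.endswith p "]"

def pvDesc (desc : Option String) (os : List String) : Option String :=
  os.foldl (fun acc o => match acc with
    | none => some o
    | some d => some (d ++ "::" ++ o)) desc

def pvDty (l : List String) (d : String) (e : Bool) : String :=
  match (l.filter pvIsExpl).getLast? with
  | some x => x
  | none => if !e && l.any pvIsBr then "str" else d

theorem pvDty_expl_cons (p : String) (l : List String) (d : String) (e : Bool)
    (hp : pvIsExpl p = true) : pvDty (p :: l) d e = pvDty l p true := by
  unfold pvDty
  rw [List.filter_cons_of_pos hp]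
  cases h : (l.filter pvIsExpl).getLast? with
  | none => simp [List.getLast?_cons, List.getLast?_eq_none_iff.mp h]
  | some x => simp [List.getLast?_cons, h]

theorem pvDty_br_cons (p : String) (l : List String) (d : String) (e : Bool)
    (hp : pvIsExpl p = false) (hb : pvIsBr p = true) :
    pvDty (p :: l) d e = pvDty l (if !e then "str" else d) e := by
  unfold pvDty
  rw [List.filter_cons_of_neg (by simp [hp]),
      show (p :: l).any pvIsBr = true by simp [hb]]
  cases (l.filter pvIsExpl).getLast? with
  | none => cases e <;> simp
  | some x => rfl

theorem pvDty_other_cons (p : String) (l : List String) (d : String) (e : Bool)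
    (hp : pvIsExpl p = false) (hb : pvIsBr p = false) :
    pvDty (p :: l) d e = pvDty l d e := by
  unfold pvDty
  rw [List.filter_cons_of_neg (by simp [hp]),
      show (p :: l).any pvIsBr = l.any pvIsBr by simp [hb]]

theorem foldA_eq (l : List String) : ∀ (d : String) (desc : Option String) (e : Bool),
    l.foldl pvStepA (d, desc, e) =
      (pvDty l d e, pvDesc desc (l.filter (fun p => !pvIsExpl p && !pvIsBr p)), e || l.any pvIsExpl) := by
  induction l with
  | nil => intro d desc e; simp [pvDty, pvDesc]
  | cons p l ih =>
    intro d desc e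
    by_cases hp : pvIsExpl p = true
    · have hstep : pvStepA (d, desc, e) p = (p, desc, true) := by
        unfold pvStepA
        rw [show (p == "str" || p == "list") = pvIsExpl p from rfl, hp]
        rfl
      simp only [List.foldl_cons, hstep, ih, pvDty_expl_cons p l d e hp,
        List.filter_cons, List.any_cons, hp]
      simp
    · rw [Bool.not_eq_true] at hp
      by_cases hb : pvIsBr p = true
      · have hstep : pvStepA (d, desc, e) p = ((if !e then "str" else d), desc, e) := by
          unfold pvStepA
          rw [show (p == "str" || p == "list") = pvIsExpl p from rfl, hp,
              show (PySem.Str.startswith p "[" && PySem.Str.endswith p "]") = pvIsBr p from rfl, hb]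
          cases e <;> rfl
        simp only [List.foldl_cons, hstep, ih, pvDty_br_cons p l d e hp hb,
          List.filter_cons, List.any_cons, hp, hb]
        simp
      · rw [Bool.not_eq_true] at hb
        have hstep : pvStepA (d, desc, e) p =
            (d, (match desc with | none => some p | some x => some (x ++ "::" ++ p)), e) := by
          unfold pvStepA
          rw [show (p == "str" || p == "list") = pvIsExpl p from rfl, hp,
              show (PySem.Str.startswith p "[" && PySem.Str.endswith p "]") = pvIsBr p from rfl, hb]
          cases desc <;> rfl
        simp only [List.foldl_cons, hstep, ih, pvDty_other_cons p l d e hp hb,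
          List.filter_cons, List.any_cons, hp, hb]
        simp [pvDesc]

-- joining with the separator already folded into the head
theorem pvJoin_merge (sep a b : List Char) (rest : List (List Char)) :
    PySem.Chars.join sep ((a ++ sep ++ b) :: rest) = a ++ sep ++ PySem.Chars.join sep (b :: rest) := by
  cases rest with
  | nil => simp [PySem.Chars.join_singleton]
  | cons r rs => simp [PySem.Chars.join_cons_cons, List.append_assoc]

theorem pvDesc_some (os : List String) : ∀ (s : String),
    pvDesc (some s) os = some (PySem.Str.join "::" (s :: os)) := by
  induction os with
  | nil =>
    intro s
    have h : PySem.Str.join "::" [s] = s := by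
      apply String.toList_inj.mp
      rw [PySem.Str.toList_join]
      simp [PySem.Chars.join_singleton]
    simp [pvDesc, h]
  | cons o os ih =>
    intro s
    have h0 : pvDesc (some s) (o :: os) = pvDesc (some (s ++ "::" ++ o)) os := rfl
    rw [h0, ih]
    have h : PySem.Str.join "::" ((s ++ "::" ++ o) :: os) = PySem.Str.join "::" (s :: o :: os) := by
      apply String.toList_inj.mp
      rw [PySem.Str.toList_join, PySem.Str.toList_join]
      have h3 := pvJoin_merge "::".toList s.toList o.toList (os.map String.toList)
      simpa using h3
    rw [h]

theorem pvDesc_none (os : List String) :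
    pvDesc none os = if os.isEmpty then none else some (PySem.Str.join "::" os) := by
  cases os with
  | nil => rfl
  | cons o os =>
    have h0 : pvDesc none (o :: os) = pvDesc (some o) os := rfl
    rw [h0, pvDesc_some]
    rfl

-- ===== bridges: String-level data on ofList = char-level data =====
theorem pvBeq_ofList (a b : List Char) : (String.ofList a == String.ofList b) = (a == b) := by
  rcases h : a == b with _|_ <;> simp_all [String.ofList_inj]

theorem pvIsExpl_ofList (p : List Char) : pvIsExpl (String.ofList p) = pvExplC p := by
  unfold pvIsExpl pvExplC
  rw [show ("str" : String) = String.ofList "str".toList from by simp,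
      show ("list" : String) = String.ofList "list".toList from by simp,
      pvBeq_ofList, pvBeq_ofList]
  simp

theorem pvIsBr_ofList (p : List Char) : pvIsBr (String.ofList p) = pvBrC p := by
  unfold pvIsBr pvBrC
  rw [PySem.Str.startswith_eq, PySem.Str.endswith_eq]
  simp

theorem pvStrJoin_ofList (os : List (List Char)) :
    PySem.Str.join "::" (os.map String.ofList) = String.ofList (PySem.Chars.join [':', ':'] os) := by
  apply String.toList_inj.mp
  rw [PySem.Str.toList_join]
  simp [Function.comp_def]

-- ===== VERDICT (by name: the statement is the Claim_ definition above) =====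
theorem parse_field_spec_spec : Claim_equal_parse_field_spec := by
  intro spec _
  unfold Spec_parse_field_spec parse_field_spec parse_field_spec_alt
  have hsplit : (PySem.Str.split? spec "::").getD [] = (pvSplitList spec.toList).map String.ofList := by
    simp [PySem.Str.split?, PySem.Chars.split?]
    rw [splitOn_eq_pvSplitList]
  rw [hsplit]
  cases hp : pvPartition spec.toList with
  | none =>
    rw [pvSplitList_eq, hp]
    simp
  | some p =>
    obtain ⟨a, b⟩ := p
    rw [pvSplitList_eq, hp]
    simp only [List.map_cons, List.tail_cons, List.headI]
    rw [foldA_eq, pvGo_eq_foldr, foldr_pvCombine_eq]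
    have hfe : (fun q => pvIsExpl q) ∘ String.ofList = pvExplC := by
      funext q; exact pvIsExpl_ofList q
    have hfb : (fun q => pvIsBr q) ∘ String.ofList = pvBrC := by
      funext q; exact pvIsBr_ofList q
    have hfo : (fun q => !pvIsExpl q && !pvIsBr q) ∘ String.ofList
        = (fun q => !pvExplC q && !pvBrC q) := by
      funext q; simp [Function.comp, pvIsExpl_ofList, pvIsBr_ofList]
    have hfilter : ((pvSplitList b).map String.ofList).filter pvIsExpl
        = ((pvSplitList b).filter pvExplC).map String.ofList := by
      rw [List.filter_map, hfe]
    have hany : ((pvSplitList b).map String.ofList).any pvIsBr = (pvSplitList b).any pvBrC := by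
      rw [List.any_map, hfb]
    have hofilter : ((pvSplitList b).map String.ofList).filter (fun q => !pvIsExpl q && !pvIsBr q)
        = ((pvSplitList b).filter (fun q => !pvExplC q && !pvBrC q)).map String.ofList := by
      rw [List.filter_map, hfo]
    refine Prod.ext rfl (Prod.ext ?_ ?_)
    · -- dtype component
      show pvDty ((pvSplitList b).map String.ofList) "list" false = _
      unfold pvDty
      cases hg : ((pvSplitList b).filter pvExplC).getLast? with
      | none =>
        have hg' : (((pvSplitList b).map String.ofList).filter pvIsExpl).getLast? = none := by
          rw [hfilter, List.getLast?_map, hg]; rfl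
        simp [hg', hany]
      | some x =>
        have hg' : (((pvSplitList b).map String.ofList).filter pvIsExpl).getLast? = some (String.ofList x) := by
          rw [hfilter, List.getLast?_map, hg]; rfl
        simp [hg']
    · -- description component
      show (pvDesc none (((pvSplitList b).map String.ofList).filter (fun q => !pvIsExpl q && !pvIsBr q))) = _
      rw [hofilter, pvDesc_none]
      rcases hos : (pvSplitList b).filter (fun q => !pvExplC q && !pvBrC q) with _ | ⟨o, os⟩
      · simp [pvDescC]
      · rw [show ((o :: os).map String.ofList) = String.ofList o :: os.map String.ofList from rfl]
        rw [show (String.ofList o :: os.map String.ofList).isEmpty = false from rfl]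
        simp only [if_neg Bool.false_ne_true, pvDescC, List.isEmpty_cons]
        rw [show (String.ofList o :: os.map String.ofList) = (o :: os).map String.ofList from rfl,
            pvStrJoin_ofList]
        simp
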